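-- pv_equiv track=rewrite | github.com/patrykz99/project_data_users | functions_to_main.py | creating_list_of_best_usersId
-- ===== SOURCE A (Python) =====
-- def creating_list_of_best_usersId(corrected_dic):
--     best_correct_value = max(corrected_dic.values())
--     worst_correct_value = min(corrected_dic.values())
--
--     list_of_best_usersId = [userId for userId, numberOfCorrectness in corrected_dic.items() \
--                             if numberOfCorrectness == best_correct_value]
--     list_of_worst_usersId = [userId for userId, numberOfCorrectness in corrected_dic.items() \
--                              if numberOfCorrectness == worst_correct_value]
--
--     return (list_of_best_usersId, list_of_worst_usersId)
-- ===== SOURCE B (Python) =====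
-- def creating_list_of_best_usersId(corrected_dic):
--     items = list(corrected_dic.items())
--     (userId0, n0), rest = items[0], items[1:]
--     best_val, best_list = n0, [userId0]
--     worst_val, worst_list = n0, [userId0]
--     for userId, n in rest:
--         if n > best_val:
--             best_val, best_list = n, [userId]
--         elif n == best_val:
--             best_list.append(userId)
--         if n < worst_val:
--             worst_val, worst_list = n, [userId]
--         elif n == worst_val:
--             worst_list.append(userId)
--     return (best_list, worst_list)
-- ===== Notes on version B (the rewrite author's own statement) =====
-- stated objective: alternative
-- what changed: Replaced the separate max(), min() and two filtering comprehensions (four traversals) by a single explicit pass that maintains the running best/worst value together with its list of userIds; it trades C-level builtins for one interpreted loop, so it is not faster in CPython.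
-- outside the precondition, e.g. on creating_list_of_best_usersId({}): A raises ValueError, B raises IndexError
import Mathlib
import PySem

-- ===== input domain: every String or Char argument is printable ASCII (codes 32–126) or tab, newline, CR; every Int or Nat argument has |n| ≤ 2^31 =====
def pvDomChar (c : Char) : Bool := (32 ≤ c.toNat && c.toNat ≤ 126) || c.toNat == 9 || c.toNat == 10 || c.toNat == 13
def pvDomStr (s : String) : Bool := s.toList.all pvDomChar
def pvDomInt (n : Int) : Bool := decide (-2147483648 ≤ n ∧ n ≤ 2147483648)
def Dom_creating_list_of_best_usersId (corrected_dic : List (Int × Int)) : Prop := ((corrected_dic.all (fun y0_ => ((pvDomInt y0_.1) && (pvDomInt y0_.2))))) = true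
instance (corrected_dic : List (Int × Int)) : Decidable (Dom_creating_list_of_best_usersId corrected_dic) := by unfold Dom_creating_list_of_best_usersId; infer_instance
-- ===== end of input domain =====

-- B: instead of A's separate max, min and two filtering comprehensions, one
-- single pass maintaining the running best/worst value and its list of userIds.

-- ===== PORT A =====
def creating_list_of_best_usersId (corrected_dic : List (Int × Int)) : List Int × List Int :=
  match PySem.List.max? (corrected_dic.map Prod.snd) (fun y => y),
        PySem.List.min? (corrected_dic.map Prod.snd) (fun y => y) with
  | some best_correct_value, some worst_correct_value =>
      ((corrected_dic.filter (fun p => p.2 == best_correct_value)).map Prod.fst,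
       (corrected_dic.filter (fun p => p.2 == worst_correct_value)).map Prod.fst)
  | _, _ => ([], [])  -- empty dict: Python's max raises ValueError here (excluded by Pre_)

-- ===== PORT B =====
-- one loop step: update (best_val, best_list) and (worst_val, worst_list) for pair (u, n)
def pvStep (s : (Int × List Int) × (Int × List Int)) (p : Int × Int) :
    (Int × List Int) × (Int × List Int) :=
  let best := if s.1.1 < p.2 then (p.2, [p.1])
              else if p.2 == s.1.1 then (s.1.1, s.1.2 ++ [p.1]) else s.1
  let worst := if p.2 < s.2.1 then (p.2, [p.1])
               else if p.2 == s.2.1 then (s.2.1, s.2.2 ++ [p.1]) else s.2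
  (best, worst)

def creating_list_of_best_usersId_alt (corrected_dic : List (Int × Int)) : List Int × List Int :=
  match corrected_dic with
  | [] => ([], [])  -- Python B raises IndexError here (excluded by Pre_)
  | (u0, n0) :: rest =>
      let s := rest.foldl pvStep ((n0, [u0]), (n0, [u0]))
      (s.1.2, s.2.2)

-- ===== PRECONDITION & SPEC =====
-- Pre_ excludes the empty dict (A's max() raises ValueError there) and association
-- lists with duplicate keys (a Python dict cannot hold them, so they correspond to
-- no input of the original function).
def Pre_creating_list_of_best_usersId (corrected_dic : List (Int × Int)) : Prop :=
  corrected_dic ≠ [] ∧ (corrected_dic.map Prod.fst).Nodup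
instance (corrected_dic : List (Int × Int)) : Decidable (Pre_creating_list_of_best_usersId corrected_dic) := by unfold Pre_creating_list_of_best_usersId; infer_instance
def pvWitness_creating_list_of_best_usersId : (List (Int × Int)) := [(1, 2), (2, 9), (3, 9), (4, 2)]

def Spec_creating_list_of_best_usersId (corrected_dic : List (Int × Int)) (out : List Int × List Int) : Prop := out = creating_list_of_best_usersId_alt corrected_dic
instance (corrected_dic : List (Int × Int)) (out : List Int × List Int) : Decidable (Spec_creating_list_of_best_usersId corrected_dic out) := by unfold Spec_creating_list_of_best_usersId; infer_instance

-- ===== CLAIM (what is proved, stated in full; the proofs are below) =====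
def Claim_equal_creating_list_of_best_usersId : Prop := ∀ (corrected_dic : List (Int × Int)), Dom_creating_list_of_best_usersId corrected_dic → Pre_creating_list_of_best_usersId corrected_dic → Spec_creating_list_of_best_usersId corrected_dic (creating_list_of_best_usersId corrected_dic)

-- ===== LEMMAS AND PROOFS =====

-- proof-only projections of pvStep: the best half and the worst half of the state
def pvStepB (s : Int × List Int) (p : Int × Int) : Int × List Int :=
  if s.1 < p.2 then (p.2, [p.1])
  else if p.2 == s.1 then (s.1, s.2 ++ [p.1]) else s

def pvStepW (s : Int × List Int) (p : Int × Int) : Int × List Int :=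
  if p.2 < s.1 then (p.2, [p.1])
  else if p.2 == s.1 then (s.1, s.2 ++ [p.1]) else s

theorem pvStep_eq (b w : Int × List Int) (p : Int × Int) :
    pvStep (b, w) p = (pvStepB b p, pvStepW w p) := by
  rfl

theorem pv_fold_split (l : List (Int × Int)) (b w : Int × List Int) :
    l.foldl pvStep (b, w) = (l.foldl pvStepB b, l.foldl pvStepW w) := by
  induction l generalizing b w with
  | nil => rfl
  | cons p t ih => simp only [List.foldl_cons, pvStep_eq, ih]

theorem pv_le_foldl_max (l : List (Int × Int)) (a : Int) :
    a ≤ l.foldl (fun s p => max s p.2) a := by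
  simpa using (PySem.List.le_foldl_max_int l Prod.snd a).1

theorem pv_foldl_min_le (l : List (Int × Int)) (a : Int) :
    l.foldl (fun s p => min s p.2) a ≤ a := by
  induction l generalizing a with
  | nil => simp
  | cons p t ih => exact le_trans (ih _) (min_le_left _ _)

theorem pvStepB_spec (l : List (Int × Int)) (bv : Int) (bl : List Int) (M : Int)
    (hM : M = l.foldl (fun a p => max a p.2) bv) :
    l.foldl pvStepB (bv, bl) =
      (M, (if bv = M then bl else []) ++ (l.filter (fun p => p.2 == M)).map Prod.fst) := by
  induction l generalizing bv bl with
  | nil => simp [hM]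
  | cons p t ih =>
    obtain ⟨u, n⟩ := p
    have hM' : M = t.foldl (fun a p => max a p.2) (max bv n) := hM
    have hup : max bv n ≤ M := hM' ▸ pv_le_foldl_max t _
    simp only [List.foldl_cons, pvStepB, List.filter_cons]
    rcases lt_trichotomy bv n with h | h | h
    · rw [if_pos h, ih n [u] (by rw [hM']; congr 1; omega)]
      have hne : bv ≠ M := by omega
      by_cases he : n = M <;> simp [he, hne]
    · rw [if_neg (by omega), if_pos (by simp [h]), ih bv (bl ++ [u]) (by rw [hM']; congr 1; omega)]
      by_cases he : bv = M <;> simp [he, h ▸ he]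
    · rw [if_neg (by omega), if_neg (by simp; omega), ih bv bl (by rw [hM']; congr 1; omega)]
      have hne : n ≠ M := by omega
      simp [hne]

theorem pvStepW_spec (l : List (Int × Int)) (wv : Int) (wl : List Int) (M : Int)
    (hM : M = l.foldl (fun a p => min a p.2) wv) :
    l.foldl pvStepW (wv, wl) =
      (M, (if wv = M then wl else []) ++ (l.filter (fun p => p.2 == M)).map Prod.fst) := by
  induction l generalizing wv wl with
  | nil => simp [hM]
  | cons p t ih =>
    obtain ⟨u, n⟩ := p
    have hM' : M = t.foldl (fun a p => min a p.2) (min wv n) := hM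
    have hup : M ≤ min wv n := hM' ▸ pv_foldl_min_le t _
    simp only [List.foldl_cons, pvStepW, List.filter_cons]
    rcases lt_trichotomy n wv with h | h | h
    · rw [if_pos h, ih n [u] (by rw [hM']; congr 1; omega)]
      have hne : wv ≠ M := by omega
      by_cases he : n = M <;> simp [he, hne]
    · rw [if_neg (by omega), if_pos (by simp [h]), ih wv (wl ++ [u]) (by rw [hM']; congr 1; omega)]
      by_cases he : wv = M <;> simp [he, h ▸ he]
    · rw [if_neg (by omega), if_neg (by simp; omega), ih wv wl (by rw [hM']; congr 1; omega)]
      have hne : n ≠ M := by omega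
      simp [hne]

-- ===== VERDICT (by name: the statement is the Claim_ definition above) =====
theorem creating_list_of_best_usersId_spec : Claim_equal_creating_list_of_best_usersId := by
  intro l _ hpre
  unfold Spec_creating_list_of_best_usersId
  obtain ⟨hne, -⟩ := hpre
  obtain ⟨⟨u0, n0⟩, rest, rfl⟩ := List.exists_cons_of_ne_nil hne
  unfold creating_list_of_best_usersId creating_list_of_best_usersId_alt
  dsimp only
  rw [pv_fold_split,
    pvStepB_spec rest n0 [u0] (rest.foldl (fun a p => max a p.2) n0) rfl,
    pvStepW_spec rest n0 [u0] (rest.foldl (fun a p => min a p.2) n0) rfl]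
  simp only [List.map_cons, PySem.List.max?_id_cons, PySem.List.min?_id_cons,
    List.foldl_map, List.filter_cons]
  set Mb := rest.foldl (fun a p => max a p.2) n0 with hMb
  set Mw := rest.foldl (fun a p => min a p.2) n0 with hMw
  by_cases hb : n0 = Mb <;> by_cases hw : n0 = Mw <;> simp [hb, hw] <;> split_ifs <;> simp
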